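-- pv_equiv track=rewrite | github.com/Karan-05/SE_Project | analysis/report.py | detect_platform_mentions
-- ===== SOURCE A (Python) =====
-- from typing import Any, Dict, Iterable, List, Optional, Sequence, Set, Tuple
--
-- def detect_platform_mentions(description: Optional[str], lookup: Dict[str, str]) -> Tuple[str, ...]:
--     if not description:
--         return ()
--     lowered = description.lower()
--     found: Set[str] = set()
--     for token, display in lookup.items():
--         if token in lowered:
--             found.add(display)
--     return tuple(sorted(found))
-- ===== SOURCE B (Python) =====
-- def detect_platform_mentions(description, lookup):
--     if not description:
--         return ()
--     lowered = description.lower()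
--     n = len(lowered)
--     lengths = {len(token) for token in lookup}
--     subs = {lowered[i:i + L] for L in lengths for i in range(n - L + 1)}
--     found = {display for token, display in lookup.items() if token in subs}
--     return tuple(sorted(found))
-- ===== Notes on version B (the rewrite author's own statement) =====
-- stated objective: faster
-- what changed: Instead of running a substring search over the description for every token, B precomputes one hash set of all description substrings whose lengths occur among the tokens, so each token is decided by a single O(len) set lookup.
import Mathlib
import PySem

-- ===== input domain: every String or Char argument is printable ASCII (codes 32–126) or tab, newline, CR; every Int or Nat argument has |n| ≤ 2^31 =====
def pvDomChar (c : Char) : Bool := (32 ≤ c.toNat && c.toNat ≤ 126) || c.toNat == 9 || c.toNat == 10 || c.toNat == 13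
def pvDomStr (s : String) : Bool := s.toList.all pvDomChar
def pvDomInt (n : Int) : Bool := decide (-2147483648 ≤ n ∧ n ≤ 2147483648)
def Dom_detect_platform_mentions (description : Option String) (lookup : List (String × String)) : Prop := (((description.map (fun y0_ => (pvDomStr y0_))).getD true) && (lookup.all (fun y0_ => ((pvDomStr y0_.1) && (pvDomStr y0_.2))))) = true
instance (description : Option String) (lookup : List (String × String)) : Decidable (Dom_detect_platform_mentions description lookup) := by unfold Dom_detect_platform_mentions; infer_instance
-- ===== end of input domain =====

-- B replaces A's per-token substring scan of the description by one precomputed set of all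
-- description substrings of the occurring token lengths; each token is then decided by a set lookup.

-- ===== PORT A =====
def detect_platform_mentions (description : Option String) (lookup : List (String × String)) : List String :=
  match description with
  | none => []
  | some d =>
    if d = "" then []
    else
      let lowered := PySem.Str.lower d
      let found : PySem.Set String :=
        (PySem.Dict.ofList lookup).items.foldl
          (fun found td => if PySem.Str.isIn td.1 lowered then PySem.Set.add found td.2 else found)
          PySem.Set.empty
      PySem.List.sorted found (fun x => x) false

-- ===== PORT B =====
def detect_platform_mentions_alt (description : Option String) (lookup : List (String × String)) : List String :=
  match description with
  | none => []
  | some d =>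
    if d = "" then []
    else
      let lowered := PySem.Str.lower d
      let n : Int := (PySem.Str.len lowered : Int)
      let dct := PySem.Dict.ofList lookup
      let lengths : PySem.Set Int := PySem.Set.ofList (dct.keys.map (fun t => ((PySem.Str.len t : Int))))
      let subs : PySem.Set String :=
        PySem.Set.ofList (lengths.flatMap (fun L =>
          (PySem.List.pyRange 0 (n - L + 1) 1).map (fun i =>
            PySem.Str.slice lowered (some i) (some (i + L)))))
      let found : PySem.Set String :=
        dct.items.foldl
          (fun found td => if PySem.Set.contains subs td.1 then PySem.Set.add found td.2 else found)
          PySem.Set.empty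
      PySem.List.sorted found (fun x => x) false

-- ===== PRECONDITION & SPEC =====
def Spec_detect_platform_mentions (description : Option String) (lookup : List (String × String)) (out : List String) : Prop := out = detect_platform_mentions_alt description lookup
instance (description : Option String) (lookup : List (String × String)) (out : List String) : Decidable (Spec_detect_platform_mentions description lookup out) := by unfold Spec_detect_platform_mentions; infer_instance

-- ===== CLAIM (what is proved, stated in full; the proofs are below) =====
def Claim_equal_detect_platform_mentions : Prop := ∀ (description : Option String) (lookup : List (String × String)), Dom_detect_platform_mentions description lookup → Spec_detect_platform_mentions description lookup (detect_platform_mentions description lookup)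

-- ===== LEMMAS AND PROOFS =====

-- Membership in B's precomputed substring set coincides with Python's substring test
-- `token in lowered`, for any token whose length is recorded in `lengths` (all of which are
-- casts of natural numbers, hence the nonnegativity hypothesis h0).
theorem pv_contains_subs_eq_isIn (lowered t : String)
    (lengths : PySem.Set Int)
    (hL : (PySem.Str.len t : Int) ∈ lengths)
    (h0 : ∀ L ∈ lengths, 0 ≤ L) :
    PySem.Set.contains
      (PySem.Set.ofList (lengths.flatMap (fun L =>
        (PySem.List.pyRange 0 ((PySem.Str.len lowered : Int) - L + 1) 1).map (fun i =>
          PySem.Str.slice lowered (some i) (some (i + L)))))) t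
      = PySem.Str.isIn t lowered := by
  rcases hiso : PySem.Str.isIn t lowered with _ | _
  · -- isIn = false : show contains = false
    rw [Bool.eq_false_iff]
    intro hc
    rw [PySem.Set.contains_iff, PySem.Set.mem_ofList, List.mem_flatMap] at hc
    obtain ⟨L, hLmem, hc⟩ := hc
    rw [List.mem_map] at hc
    obtain ⟨i, hi, hslice⟩ := hc
    rw [PySem.List.mem_pyRange_one] at hi
    have : PySem.Str.isIn t lowered = true := by
      rw [← hslice]
      rw [PySem.Str.isIn_iff_infix, PySem.Str.toList_slice]
      simp only [PySem.Chars.slice_eq_listSlice]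
      rw [PySem.List.slice_toNat _ hi.1 (by have := h0 L hLmem; omega)]
      exact ((List.take_prefix _ _).isInfix).trans (List.drop_suffix _ _).isInfix
    rw [this] at hiso; exact absurd hiso (by decide)
  · -- isIn = true : show contains = true
    rw [PySem.Set.contains_iff, PySem.Set.mem_ofList, List.mem_flatMap]
    have h := hiso
    rw [PySem.Str.isIn_iff_infix] at h
    obtain ⟨s₁, s₂, hh⟩ := h
    rw [List.append_assoc] at hh
    have hlen : s₁.length + t.toList.length ≤ lowered.toList.length := by
      have := congrArg List.length hh; simp only [List.length_append] at this; omega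
    have htake : (lowered.toList.drop s₁.length).take t.toList.length = t.toList := by
      rw [← hh]; simp
    refine ⟨(PySem.Str.len t : Int), hL, ?_⟩
    rw [List.mem_map]
    refine ⟨(s₁.length : Int), ?_, ?_⟩
    · rw [PySem.List.mem_pyRange_one]
      constructor
      · positivity
      · simp only [PySem.Str.len_eq]
        omega
    · apply String.toList_inj.mp
      rw [PySem.Str.toList_slice]
      simp only [PySem.Chars.slice_eq_listSlice, PySem.Str.len_eq]
      rw [PySem.List.slice_natCast_add]
      exact htake

-- The two ports agree on every input: the folds over the same dict items use
-- pointwise-equal conditions, hence build the same set; sorting it gives the same list.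
theorem pv_main_eq : ∀ (description : Option String) (lookup : List (String × String)),
    detect_platform_mentions description lookup = detect_platform_mentions_alt description lookup := by
  intro description lookup
  cases description with
  | none => rfl
  | some d =>
    by_cases hd : d = ""
    · simp [detect_platform_mentions, detect_platform_mentions_alt, hd]
    · simp only [detect_platform_mentions, detect_platform_mentions_alt, if_neg hd]
      congr 1
      apply PySem.List.foldl_congr_mem
      intro acc td hmem
      have hkey : td.1 ∈ (PySem.Dict.ofList lookup).keys := by
        have : (td.1, td.2) ∈ (PySem.Dict.ofList lookup).items := by simpa using hmem
        exact PySem.Dict.mem_keys_of_mem_items _ this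
      have hL : (PySem.Str.len td.1 : Int) ∈
          PySem.Set.ofList (((PySem.Dict.ofList lookup).keys).map (fun t => ((PySem.Str.len t : Int)))) := by
        rw [PySem.Set.mem_ofList, List.mem_map]
        exact ⟨td.1, hkey, rfl⟩
      have h0 : ∀ L ∈ PySem.Set.ofList (((PySem.Dict.ofList lookup).keys).map (fun t => ((PySem.Str.len t : Int)))), 0 ≤ L := by
        intro L hLm
        rw [PySem.Set.mem_ofList, List.mem_map] at hLm
        obtain ⟨t', _, rfl⟩ := hLm
        exact Int.natCast_nonneg _
      rw [pv_contains_subs_eq_isIn (PySem.Str.lower d) td.1 _ hL h0]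

-- ===== VERDICT (by name: the statement is the Claim_ definition above) =====
theorem detect_platform_mentions_spec : Claim_equal_detect_platform_mentions := by
  intro description lookup _
  unfold Spec_detect_platform_mentions
  exact pv_main_eq description lookup
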